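-- pv_equiv track=rewrite | github.com/tav607/omni_transcriber | src/utils/url_parser.py | _is_youtube_host
-- ===== SOURCE A (Python) =====
-- YOUTUBE_DOMAINS = frozenset(["youtube.com", "youtu.be", "youtube-nocookie.com"])
--
-- def _is_youtube_host(hostname: str) -> bool:
--     """
--     Check if a hostname is a valid YouTube domain.
--
--     Uses strict matching to prevent bypass attacks like youtube.com.evil.com
--     """
--     if not hostname:
--         return False
--
--     hostname = hostname.lower()
--
--     # Check exact match or valid subdomain
--     for domain in YOUTUBE_DOMAINS:
--         if hostname == domain or hostname.endswith("." + domain):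
--             return True
--
--     return False
-- ===== SOURCE B (Python) =====
-- YOUTUBE_DOMAINS = frozenset(["youtube.com", "youtu.be", "youtube-nocookie.com"])
--
-- def _is_youtube_host(hostname: str) -> bool:
--     # All listed domains are exactly two labels, so the hostname matches
--     # (exactly or as a subdomain) iff its last two labels form a listed domain.
--     labels = hostname.lower().split(".")
--     return ".".join(labels[-2:]) in YOUTUBE_DOMAINS
-- ===== Notes on version B (the rewrite author's own statement) =====
-- stated objective: idiomatic
-- what changed: Replaces the loop over YOUTUBE_DOMAINS with equality/endswith tests per domain by computing the hostname's last-two-labels suffix (lower, split on '.', rejoin the last two) and doing a single frozenset membership lookup; correct because every listed domain has exactly two labels.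
import Mathlib
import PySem

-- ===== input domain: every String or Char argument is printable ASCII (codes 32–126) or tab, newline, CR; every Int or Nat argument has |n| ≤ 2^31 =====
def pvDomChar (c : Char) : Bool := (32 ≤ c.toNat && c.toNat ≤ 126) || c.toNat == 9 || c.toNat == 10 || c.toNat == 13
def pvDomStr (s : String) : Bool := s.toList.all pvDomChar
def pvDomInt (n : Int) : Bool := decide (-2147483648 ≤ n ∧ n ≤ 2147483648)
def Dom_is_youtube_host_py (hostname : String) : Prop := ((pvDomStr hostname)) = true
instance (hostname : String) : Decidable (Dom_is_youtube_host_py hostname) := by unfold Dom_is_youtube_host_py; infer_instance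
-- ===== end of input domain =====

-- B replaces A's per-domain equality/endswith loop by one last-two-labels suffix
-- computation plus a single membership test (idiomatic restructuring; same value).

-- module constant YOUTUBE_DOMAINS (both ports consume it only via OR / membership,
-- so the frozenset's iteration order cannot affect the result)
def ytDomains : List (List Char) :=
  ["youtube.com".toList, "youtu.be".toList, "youtube-nocookie.com".toList]

-- ===== PORT A =====
def is_youtube_host_py (hostname : String) : Bool :=
  if hostname.toList.isEmpty then false
  else
    let h := PySem.Chars.lower hostname.toList
    ytDomains.any (fun d => h == d || PySem.Chars.endswith h (['.'] ++ d))

-- ===== PORT B =====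
def is_youtube_host_py_alt (hostname : String) : Bool :=
  let labels := PySem.Chars.splitOn (PySem.Chars.lower hostname.toList) ['.']
  ytDomains.contains (PySem.Chars.join ['.'] (PySem.List.slice labels (some (-2)) none))

-- ===== PRECONDITION & SPEC =====
def Spec_is_youtube_host_py (hostname : String) (out : Bool) : Prop := out = is_youtube_host_py_alt hostname
instance (hostname : String) (out : Bool) : Decidable (Spec_is_youtube_host_py hostname out) := by unfold Spec_is_youtube_host_py; infer_instance

-- ===== CLAIM (what is proved, stated in full; the proofs are below) =====
def Claim_equal_is_youtube_host_py : Prop := ∀ (hostname : String), Dom_is_youtube_host_py hostname → Spec_is_youtube_host_py hostname (is_youtube_host_py hostname)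

-- ===== LEMMAS AND PROOFS =====
def spl : List Char → List (List Char)
  | [] => [[]]
  | c :: r => if c = '.' then [] :: spl r else (spl r).modifyHead (c :: ·)

theorem spl_ne_nil (l : List Char) : spl l ≠ [] := by
  cases l with
  | nil => simp [spl]
  | cons c r =>
    simp only [spl]
    split
    · simp
    · have := spl_ne_nil r
      cases h : spl r with
      | nil => exact absurd h this
      | cons a t => simp

theorem go_eq (l : List Char) : ∀ (fuel : Nat) (cur : List Char) (acc : List (List Char)),
    l.length ≤ fuel →
    PySem.Chars.splitOn.go ['.'] fuel l cur acc
      = acc.reverse ++ (spl l).modifyHead (cur.reverse ++ ·) := by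
  induction l with
  | nil =>
    intro fuel cur acc _
    cases fuel <;> simp [PySem.Chars.splitOn.go, spl]
  | cons c r ih =>
    intro fuel cur acc hf
    cases fuel with
    | zero => simp at hf
    | succ f =>
      have hr : r.length ≤ f := by simpa using hf
      by_cases hc : c = '.'
      · subst hc
        have hpre : List.isPrefixOf ['.'] ('.' :: r) = true := by simp [List.isPrefixOf]
        rw [PySem.Chars.splitOn.go]
        simp only [hpre, if_pos, List.length_cons, List.length_nil, List.drop_succ_cons, List.drop_zero]
        rw [ih f [] (List.reverse cur :: acc) hr]
        obtain ⟨a, t, h⟩ : ∃ a t, spl r = a :: t := by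
          cases h : spl r with
          | nil => exact absurd h (spl_ne_nil r)
          | cons a t => exact ⟨a, t, rfl⟩
        simp [spl, h]
      · have hpre : List.isPrefixOf ['.'] (c :: r) = false := by
          simp [List.isPrefixOf]; exact fun h => absurd h.symm hc
        rw [PySem.Chars.splitOn.go]
        simp only [hpre, Bool.false_eq_true]
        rw [ih f (c :: cur) acc hr]
        obtain ⟨a, t, h⟩ : ∃ a t, spl r = a :: t := by
          cases h : spl r with
          | nil => exact absurd h (spl_ne_nil r)
          | cons a t => exact ⟨a, t, rfl⟩
        simp [spl, if_neg hc, h]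

theorem splitOn_eq (l : List Char) : PySem.Chars.splitOn l ['.'] = spl l := by
  rw [PySem.Chars.splitOn, go_eq l (l.length + 1) [] [] (by omega)]
  obtain ⟨a, t, h⟩ : ∃ a t, spl l = a :: t := by
    cases h : spl l with
    | nil => exact absurd h (spl_ne_nil l)
    | cons a t => exact ⟨a, t, rfl⟩
  simp [h]

theorem spl_length (l : List Char) : (spl l).length = l.count '.' + 1 := by
  induction l with
  | nil => simp [spl]
  | cons c r ih =>
    by_cases hc : c = '.'
    · subst hc; simp [spl, ih]
    · simp [spl, ih, hc]

theorem join_cons_head (c : Char) (h : List Char) (t : List (List Char)) :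
    PySem.Chars.join ['.'] ((c :: h) :: t) = c :: PySem.Chars.join ['.'] (h :: t) := by
  cases t with
  | nil => simp [PySem.Chars.join, List.intercalate]
  | cons y t' => simp [PySem.Chars.join_cons_cons]

theorem join_spl (l : List Char) : PySem.Chars.join ['.'] (spl l) = l := by
  induction l with
  | nil => simp [spl, PySem.Chars.join, List.intercalate]
  | cons c r ih =>
    obtain ⟨a, t, h⟩ : ∃ a t, spl r = a :: t := by
      cases h : spl r with
      | nil => exact absurd h (spl_ne_nil r)
      | cons a t => exact ⟨a, t, rfl⟩
    by_cases hc : c = '.'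
    · subst hc
      have hs : spl ('.' :: r) = [] :: a :: t := by simp [spl, h]
      rw [hs, PySem.Chars.join_cons_cons, ← h, ih]
      simp
    · have hs : spl (c :: r) = (c :: a) :: t := by simp [spl, hc, h]
      rw [hs, join_cons_head, ← h, ih]

theorem slice_neg2 {α : Type} (xs : List α) :
    PySem.List.slice xs (some (-2)) none = xs.drop (xs.length - 2) := by
  simp only [PySem.List.slice, PySem.List.clampIdx]
  split_ifs with h1 h2
  · have hlen : xs.length ≤ 2 := by omega
    have : (0:Int) = ((0:Nat):Int) := by simp
    simp only [Nat.sub_eq_zero_of_le hlen, List.drop_zero]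
    rw [List.take_of_length_le (by simp)]
  · have hx : ((xs.length:Int) + -2).toNat = xs.length - 2 := by omega
    rw [hx]
    rw [List.take_of_length_le (by simp)]
  · omega

def lj (l : List Char) : List Char :=
  PySem.Chars.join ['.'] ((spl l).drop ((spl l).length - 2))

theorem lj_small {l : List Char} (h : l.count '.' ≤ 1) : lj l = l := by
  unfold lj
  have hlen : (spl l).length ≤ 2 := by rw [spl_length]; omega
  rw [Nat.sub_eq_zero_of_le hlen, List.drop_zero, join_spl]

theorem lj_cons_dot {r : List Char} (h : 1 ≤ r.count '.') : lj ('.' :: r) = lj r := by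
  unfold lj
  have hs : spl ('.' :: r) = [] :: spl r := by simp [spl]
  have hlen : (spl r).length = r.count '.' + 1 := spl_length r
  rw [hs]
  have h1 : ([] :: spl r).length - 2 = ((spl r).length - 2) + 1 := by simp; omega
  rw [h1, List.drop_succ_cons]

theorem lj_cons_ne {c : Char} {r : List Char} (hc : c ≠ '.') (h : 2 ≤ r.count '.') :
    lj (c :: r) = lj r := by
  unfold lj
  obtain ⟨a, t, hsr⟩ : ∃ a t, spl r = a :: t := by
    cases h : spl r with
    | nil => exact absurd h (spl_ne_nil r)
    | cons a t => exact ⟨a, t, rfl⟩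
  have hs : spl (c :: r) = (c :: a) :: t := by simp [spl, hc, hsr]
  have hlen : t.length + 1 = r.count '.' + 1 := by
    have := spl_length r
    rw [hsr] at this
    simpa using this
  rw [hs, hsr]
  have h1 : ((c :: a) :: t).length - 2 = (t.length - 2) + 1 := by simp; omega
  have h2 : (a :: t).length - 2 = (t.length - 2) + 1 := by simp; omega
  rw [h1, h2, List.drop_succ_cons, List.drop_succ_cons]

theorem lj_big {l : List Char} (h : 2 ≤ l.count '.') :
    ∃ a, l = a ++ '.' :: lj l ∧ (lj l).count '.' = 1 := by
  induction l with
  | nil => simp at h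
  | cons c r ih =>
    by_cases hc : c = '.'
    · subst hc
      have hcc : ('.' :: r).count '.' = r.count '.' + 1 := by simp
      have hr : 1 ≤ r.count '.' := by omega
      rw [lj_cons_dot hr]
      by_cases h2 : 2 ≤ r.count '.'
      · obtain ⟨a, ha, hcnt⟩ := ih h2
        exact ⟨'.' :: a, by rw [List.cons_append, ← ha], hcnt⟩
      · have h1 : r.count '.' = 1 := by omega
        rw [lj_small (by omega)]
        exact ⟨[], by simp, h1⟩
    · have hcc : (c :: r).count '.' = r.count '.' := by simp [hc]
      have hr : 2 ≤ r.count '.' := by omega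
      rw [lj_cons_ne hc hr]
      obtain ⟨a, ha, hcnt⟩ := ih hr
      exact ⟨c :: a, by rw [List.cons_append, ← ha], hcnt⟩

theorem suffix_unique {l s t : List Char} (hs : '.' :: s <:+ l) (ht : '.' :: t <:+ l)
    (hcs : s.count '.' = 1) (hct : t.count '.' = 1) : s = t := by
  have key2 : ∀ {x y : List Char}, '.' :: x <:+ '.' :: y → x.count '.' = 1 → y.count '.' = 1 → x = y := by
    intro x y hxy hx hy
    rcases List.suffix_cons_iff.mp hxy with h | h
    · injection h with _ h2
    · have hle := (List.IsSuffix.sublist h).count_le '.'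
      have hcc : ('.' :: x).count '.' = x.count '.' + 1 := by simp
      rw [hcc, hx] at hle
      omega
  rcases List.suffix_or_suffix_of_suffix hs ht with h | h
  · exact key2 h hcs hct
  · exact (key2 h hct hcs).symm

theorem dom_facts : ∀ d ∈ ytDomains, d.count '.' = 1 ∧ d ≠ [] := by decide

theorem key (l : List Char) :
    (!l.isEmpty && ytDomains.any (fun d => l == d || PySem.Chars.endswith l (['.'] ++ d)))
      = ytDomains.contains (lj l) := by
  rw [Bool.eq_iff_iff]
  simp only [Bool.and_eq_true, Bool.not_eq_true', List.isEmpty_eq_false_iff,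
    List.any_eq_true, Bool.or_eq_true, beq_iff_eq, PySem.Chars.endswith_iff,
    List.contains_iff_mem, List.cons_append, List.nil_append]
  constructor
  · rintro ⟨hne, d, hd, hcase⟩
    have hdc := (dom_facts d hd).1
    rcases hcase with rfl | hsuf
    · rw [lj_small (by omega)]; exact hd
    · have hcl : 2 ≤ l.count '.' := by
        have := (List.IsSuffix.sublist hsuf).count_le '.'
        have hcc : ('.' :: d).count '.' = d.count '.' + 1 := by simp
        omega
      obtain ⟨a, ha, hcnt⟩ := lj_big hcl
      have : d = lj l := suffix_unique hsuf ⟨a, ha.symm⟩ hdc hcnt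
      rw [← this]; exact hd
  · intro hmem
    obtain ⟨hdc, hdne⟩ := dom_facts _ hmem
    by_cases hcl : 2 ≤ l.count '.'
    · obtain ⟨a, ha, _⟩ := lj_big hcl
      refine ⟨by rw [ha]; simp, lj l, hmem, Or.inr ⟨a, ha.symm⟩⟩
    · have hl : lj l = l := lj_small (by omega)
      rw [hl] at hmem hdne
      exact ⟨hdne, l, hmem, Or.inl rfl⟩

-- ===== VERDICT (by name: the statement is the Claim_ definition above) =====
theorem is_youtube_host_py_spec : Claim_equal_is_youtube_host_py := by
  intro hostname _
  unfold Spec_is_youtube_host_py is_youtube_host_py is_youtube_host_py_alt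
  simp only [splitOn_eq, slice_neg2]
  have hB : ytDomains.contains (PySem.Chars.join ['.']
      ((spl (PySem.Chars.lower hostname.toList)).drop
        ((spl (PySem.Chars.lower hostname.toList)).length - 2)))
      = ytDomains.contains (lj (PySem.Chars.lower hostname.toList)) := rfl
  rw [hB, ← key (PySem.Chars.lower hostname.toList)]
  have hemp : (PySem.Chars.lower hostname.toList).isEmpty = hostname.toList.isEmpty := by
    simp [PySem.Chars.lower]
  by_cases he : hostname.toList.isEmpty
  · simp [he, hemp]
  · simp [he, hemp]
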